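-- pv_equiv track=rewrite | github.com/kamaraj1226/leetcode_challanges | completed/826_Most_Profit_Assigning_Work.py | solution
-- ===== SOURCE A (Python) =====
-- def solution(difficulty, profit, worker):
--
--     works = sorted(list(zip(difficulty, profit)))
--
--     worker.sort()
--
--     total = 0
--
--     i = 0
--     N = len(works)
--
--     _max = 0
--     for _worker in worker:
--         while i < N and works[i][0] <= _worker:
--             _max = max(_max, works[i][1])
--             i += 1
--
--         total += _max
--
--     return total
-- ===== SOURCE B (Python) =====
-- def _bisect_right(a, x):
--     lo, hi = 0, len(a)
--     while lo < hi:
--         mid = (lo + hi) // 2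
--         if x < a[mid]:
--             hi = mid
--         else:
--             lo = mid + 1
--     return lo
--
--
-- def solution(difficulty, profit, worker):
--     works = sorted(zip(difficulty, profit))
--     diffs = [d for d, _ in works]
--     # best[k] = max profit among the k easiest jobs (0 if none)
--     best = [0]
--     cur = 0
--     for _, p in works:
--         cur = max(cur, p)
--         best.append(cur)
--     worker.sort()  # keep A's in-place sort of worker (same observable mutation)
--     total = 0
--     for w in worker:
--         total += best[_bisect_right(diffs, w)]
--     return total
-- ===== Notes on version B (the rewrite author's own statement) =====
-- stated objective: alternative
-- what changed: Replaces A's coupled two-pointer sweep (sorted workers consuming sorted jobs with a running max) by a precomputed prefix-maximum table over difficulty-sorted jobs queried per worker with a hand-rolled binary search; worker.sort() is kept so the in-place mutation of worker is identical.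
import Mathlib
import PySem

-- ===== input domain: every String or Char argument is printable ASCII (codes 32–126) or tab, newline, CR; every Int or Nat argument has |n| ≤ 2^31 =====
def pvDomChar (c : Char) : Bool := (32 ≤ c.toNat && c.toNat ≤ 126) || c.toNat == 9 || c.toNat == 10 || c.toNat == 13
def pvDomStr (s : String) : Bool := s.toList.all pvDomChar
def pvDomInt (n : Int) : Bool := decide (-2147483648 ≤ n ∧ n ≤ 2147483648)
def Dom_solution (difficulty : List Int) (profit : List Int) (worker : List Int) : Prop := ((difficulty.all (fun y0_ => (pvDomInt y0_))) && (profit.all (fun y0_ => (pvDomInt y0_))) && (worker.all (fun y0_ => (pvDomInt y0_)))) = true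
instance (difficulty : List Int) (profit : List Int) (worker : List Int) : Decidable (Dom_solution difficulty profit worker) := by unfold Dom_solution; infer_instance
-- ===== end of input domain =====

-- B replaces A's two-pointer sweep by a prefix-maximum table queried per worker via binary
-- search (an alternative decomposition, same cost); both sort `worker` in place in Python,
-- so the observable mutation is identical and the theorem is about the return value.


-- ===== PORT A =====
-- the inner `while i < N and works[i][0] <= _worker` loop
def solutionWhile (works : List (Int × Int)) (w : Int) (i : Nat) (m : Int) : Nat × Int :=
  if h : i < works.length then
    if (works[i]'h).1 ≤ w then
      solutionWhile works w (i + 1) (max m (works[i]'h).2)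
    else (i, m)
  else (i, m)
termination_by works.length - i
decreasing_by omega

def solution (difficulty : List Int) (profit : List Int) (worker : List Int) : Int :=
  let works := PySem.List.sorted2 (difficulty.zip profit) Prod.fst Prod.snd
  let ws := PySem.List.sorted worker (fun x => x)
  (ws.foldl (fun (s : Nat × Int × Int) w =>
      let r := solutionWhile works w s.1 s.2.1
      (r.1, r.2, s.2.2 + r.2)) (0, 0, 0)).2.2

-- ===== PORT B =====
def solution_alt (difficulty : List Int) (profit : List Int) (worker : List Int) : Int :=
  let works := PySem.List.sorted2 (difficulty.zip profit) Prod.fst Prod.snd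
  let diffs := works.map Prod.fst
  -- best = [0]; cur = 0; for _, p in works: cur = max(cur, p); best.append(cur)
  let best := (works.foldl (fun (s : List Int × Int) pr =>
      let c := max s.2 pr.2
      (s.1 ++ [c], c)) ([0], 0)).1
  let ws := PySem.List.sorted worker (fun x => x)
  -- _bisect_right is the textbook lo/hi halving loop = PySem.List.bisectRight
  ws.foldl (fun total w =>
      total + PySem.List.pyGetD best ((PySem.List.bisectRight diffs w : Nat) : Int) 0) 0

-- ===== PRECONDITION & SPEC =====
def Spec_solution (difficulty : List Int) (profit : List Int) (worker : List Int) (out : Int) : Prop := out = solution_alt difficulty profit worker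
instance (difficulty : List Int) (profit : List Int) (worker : List Int) (out : Int) : Decidable (Spec_solution difficulty profit worker out) := by unfold Spec_solution; infer_instance

-- ===== CLAIM (what is proved, stated in full; the proofs are below) =====
def Claim_equal_solution : Prop := ∀ (difficulty : List Int) (profit : List Int) (worker : List Int), Dom_solution difficulty profit worker → Spec_solution difficulty profit worker (solution difficulty profit worker)

-- ===== LEMMAS AND PROOFS =====

-- max profit among the k easiest jobs of `works` (0 if none)
def maxTake (works : List (Int × Int)) (k : Nat) : Int :=
  ((works.take k).map Prod.snd).foldl max 0

-- insertion into a list sorted by a strict "before" keeps it sorted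
theorem insertBy_pairwise {α : Type} (bf : α → α → Bool)
    (hasym : ∀ a b, bf a b = true → bf b a = false)
    (htr : ∀ a b c, bf a b = true → bf b c = true → bf a c = true)
    (x : α) (l : List α) (hl : l.Pairwise (fun a b => bf b a = false)) :
    (PySem.List.insertBy bf x l).Pairwise (fun a b => bf b a = false) := by
  induction l with
  | nil => simp [PySem.List.insertBy]
  | cons y ys ih =>
    rw [List.pairwise_cons] at hl
    by_cases hxy : bf x y = true
    · simp only [PySem.List.insertBy, hxy, if_true]
      refine List.Pairwise.cons ?_ (List.Pairwise.cons hl.1 hl.2)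
      intro z hz
      rcases List.mem_cons.1 hz with rfl | hz
      · exact hasym _ _ hxy
      · by_contra hzx
        have hzx' : bf z x = true := by
          cases h' : bf z x with
          | false => exact absurd h' hzx
          | true => rfl
        have := htr z x y hzx' hxy
        rw [hl.1 z hz] at this
        exact Bool.false_ne_true this
    · have hxy' : bf x y = false := by
        cases h' : bf x y with
        | false => rfl
        | true => exact absurd h' hxy
      simp only [PySem.List.insertBy, hxy', Bool.false_eq_true, if_false]
      refine List.Pairwise.cons ?_ (ih hl.2)
      intro z hz
      rcases (PySem.List.mem_insertBy _ _ _ _).1 hz with rfl | hz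
      · exact hxy'
      · exact hl.1 z hz

theorem foldl_insertBy_pairwise {α : Type} (bf : α → α → Bool)
    (hasym : ∀ a b, bf a b = true → bf b a = false)
    (htr : ∀ a b c, bf a b = true → bf b c = true → bf a c = true)
    (xs : List α) :
    ∀ acc : List α, acc.Pairwise (fun a b => bf b a = false) →
      (xs.foldl (fun acc x => PySem.List.insertBy bf x acc) acc).Pairwise
        (fun a b => bf b a = false) := by
  induction xs with
  | nil => intro acc h; simpa using h
  | cons x xs ih =>
    intro acc h
    exact ih _ (insertBy_pairwise bf hasym htr x acc h)

-- `sorted(zip(difficulty, profit))` is nondecreasing in the first component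
theorem works_pairwise (xs : List (Int × Int)) :
    (PySem.List.sorted2 xs Prod.fst Prod.snd).Pairwise (fun a b => a.1 ≤ b.1) := by
  have h := foldl_insertBy_pairwise
      (fun a b : Int × Int => decide (a.1 < b.1) || (!decide (b.1 < a.1) && decide (a.2 < b.2)))
      (by intro a b hab; simp at hab ⊢; omega)
      (by intro a b c hab hbc; simp at hab hbc ⊢; omega)
      xs [] (List.Pairwise.nil)
  have heq : PySem.List.sorted2 xs Prod.fst Prod.snd =
      xs.foldl (fun acc x => PySem.List.insertBy
        (fun a b : Int × Int => decide (a.1 < b.1) || (!decide (b.1 < a.1) && decide (a.2 < b.2)))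
        x acc) [] := rfl
  rw [heq]
  refine h.imp ?_
  intro a b hba
  simp at hba
  omega

-- the prefix-maximum loop of B builds exactly the table of `maxTake`
theorem bestFold_spec (works : List (Int × Int)) :
    works.foldl (fun (s : List Int × Int) pr =>
        ((s.1 ++ [max s.2 pr.2], max s.2 pr.2) : List Int × Int)) ([0], 0)
      = ((List.range (works.length + 1)).map (maxTake works), maxTake works works.length) := by
  induction works using List.reverseRecOn with
  | nil => simp [maxTake]
  | append_singleton ws pr ih =>
    rw [List.foldl_append, ih, List.foldl_cons, List.foldl_nil]
    have htk : ∀ k : Nat, k ≤ ws.length → maxTake (ws ++ [pr]) k = maxTake ws k := by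
      intro k hk
      simp [maxTake, List.take_append_of_le_length hk]
    have hlast : maxTake (ws ++ [pr]) (ws.length + 1) = max (maxTake ws ws.length) pr.2 := by
      unfold maxTake
      rw [List.take_of_length_le (by simp), List.take_length, List.map_append, List.foldl_append]
      simp
    have hlen : (ws ++ [pr]).length = ws.length + 1 := by simp
    rw [hlen, List.range_succ (n := ws.length + 1), List.map_append,
      List.map_congr_left (fun k hk => htk k (Nat.lt_succ_iff.1 (List.mem_range.1 hk))), hlast]
    simp [hlast]

-- reading the table at index k ≤ n gives maxTake works k
theorem best_getD (works : List (Int × Int)) (k : Nat) (hk : k ≤ works.length) :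
    PySem.List.pyGetD ((List.range (works.length + 1)).map (maxTake works)) (k : Int) 0
      = maxTake works k := by
  rw [PySem.List.pyGetD_natCast]
  rw [List.getD_eq_getElem?_getD]
  have hk' : k < ((List.range (works.length + 1)).map (maxTake works)).length := by
    simpa using Nat.lt_succ_of_le hk
  rw [List.getElem?_eq_getElem hk']
  simp

-- bisectRight is monotone in the probe on a sorted list
theorem bisectRight_mono (diffs : List Int) (hs : diffs.Pairwise (· ≤ ·))
    (w w' : Int) (hww : w ≤ w') :
    PySem.List.bisectRight diffs w ≤ PySem.List.bisectRight diffs w' := by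
  obtain ⟨hle, hlt, hgt⟩ := PySem.List.bisectRight_spec diffs w hs
  obtain ⟨hle', hlt', hgt'⟩ := PySem.List.bisectRight_spec diffs w' hs
  by_contra hcon
  replace hcon : PySem.List.bisectRight diffs w' < PySem.List.bisectRight diffs w :=
    Nat.lt_of_not_le hcon
  have hj : PySem.List.bisectRight diffs w' < diffs.length := lt_of_lt_of_le hcon hle
  have h1 : diffs[PySem.List.bisectRight diffs w'] ≤ w := hlt _ hj hcon
  have h2 : w' < diffs[PySem.List.bisectRight diffs w'] := hgt' _ hj le_rfl
  omega

-- the inner while loop of A advances the pointer exactly to bisectRight and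
-- folds the skipped profits into the running max
theorem solutionWhile_spec (works : List (Int × Int))
    (hW : works.Pairwise (fun a b => a.1 ≤ b.1)) (w : Int) :
    ∀ i m, i ≤ PySem.List.bisectRight (works.map Prod.fst) w →
      solutionWhile works w i m =
        (PySem.List.bisectRight (works.map Prod.fst) w,
         (((works.drop i).take (PySem.List.bisectRight (works.map Prod.fst) w - i)).map
            Prod.snd).foldl max m) := by
  have hs : (works.map Prod.fst).Pairwise (· ≤ ·) := List.pairwise_map.2 hW
  obtain ⟨hK, hlt, hgt⟩ := PySem.List.bisectRight_spec (works.map Prod.fst) w hs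
  set K := PySem.List.bisectRight (works.map Prod.fst) w with hKdef
  have main : ∀ (d : Nat) (i : Nat) (m : Int), K - i = d → i ≤ K →
      solutionWhile works w i m =
        (K, (((works.drop i).take (K - i)).map Prod.snd).foldl max m) := by
    intro d
    induction d with
    | zero =>
      intro i m hi hiK
      have hiK' : i = K := by omega
      rw [solutionWhile, ← hiK', show i - i = 0 from by omega]
      by_cases hin : i < works.length
      · rw [dif_pos hin]
        have hgt' : w < (works[i]'hin).1 := by
          have := hgt i (by simpa using hin) (by omega)
          simpa using this
        rw [if_neg (by omega)]
        simp
      · rw [dif_neg hin]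
        simp
    | succ d ih =>
      intro i m hi hiK
      have hiltK : i < K := by omega
      have hin : i < works.length := lt_of_lt_of_le hiltK (by simpa using hK)
      have hle : (works[i]'hin).1 ≤ w := by
        have := hlt i (by simpa using hin) hiltK
        simpa using this
      rw [solutionWhile, dif_pos hin, if_pos hle]
      rw [ih (i + 1) (max m (works[i]'hin).2) (by omega) (by omega)]
      have hdrop : works.drop i = (works[i]'hin) :: works.drop (i + 1) :=
        (List.getElem_cons_drop hin).symm
      have h2 : K - i = (K - (i + 1)) + 1 := by omega
      rw [hdrop, h2, List.take_succ_cons]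
      simp
  intro i m hiK
  exact main (K - i) i m rfl hiK

-- folding max over take K equals folding over take i then the middle segment
theorem maxTake_split (works : List (Int × Int)) (i K : Nat) (hiK : i ≤ K) :
    maxTake works K =
      (((works.drop i).take (K - i)).map Prod.snd).foldl max (maxTake works i) := by
  unfold maxTake
  have h1 : works.take K = works.take i ++ (works.drop i).take (K - i) := by
    conv_lhs => rw [show K = i + (K - i) by omega]
    exact List.take_add
  rw [h1, List.map_append, List.foldl_append]

-- the outer worker loop of A sums maxTake at the bisect point of each worker
theorem outer_fold (works : List (Int × Int))
    (hW : works.Pairwise (fun a b => a.1 ≤ b.1)) :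
    ∀ (ws : List Int), ws.Pairwise (· ≤ ·) →
      ∀ (i : Nat) (m t : Int),
        (∀ w ∈ ws, i ≤ PySem.List.bisectRight (works.map Prod.fst) w) →
        m = maxTake works i →
        (ws.foldl (fun (s : Nat × Int × Int) w =>
            let r := solutionWhile works w s.1 s.2.1
            (r.1, r.2, s.2.2 + r.2)) (i, m, t)).2.2
          = t + (ws.map (fun w =>
              maxTake works (PySem.List.bisectRight (works.map Prod.fst) w))).sum := by
  have hs : (works.map Prod.fst).Pairwise (· ≤ ·) := List.pairwise_map.2 hW
  intro ws
  induction ws with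
  | nil => intro _ i m t _ _; simp
  | cons w ws ih =>
    intro hp i m t hinv hm
    rw [List.pairwise_cons] at hp
    have hiK : i ≤ PySem.List.bisectRight (works.map Prod.fst) w :=
      hinv w (List.mem_cons_self)
    set K := PySem.List.bisectRight (works.map Prod.fst) w with hKdef
    have hKn : K ≤ works.length := by
      have := (PySem.List.bisectRight_spec (works.map Prod.fst) w hs).1
      simpa using this
    rw [List.foldl_cons]
    simp only [solutionWhile_spec works hW w i m hiK]
    have hmK : (((works.drop i).take (K - i)).map Prod.snd).foldl max m = maxTake works K := by
      rw [hm]; exact (maxTake_split works i K hiK).symm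
    rw [ih hp.2 K _ _ ?_ hmK]
    · rw [hmK]
      simp [List.map_cons, List.sum_cons]
      ring
    · intro w' hw'
      exact bisectRight_mono (works.map Prod.fst) hs w w' (hp.1 w' hw')

-- ===== VERDICT (by name: the statement is the Claim_ definition above) =====
theorem solution_spec : Claim_equal_solution := by
  intro difficulty profit worker _
  unfold Spec_solution solution solution_alt
  simp only []
  set works := PySem.List.sorted2 (difficulty.zip profit) Prod.fst Prod.snd with hworks
  have hW : works.Pairwise (fun a b => a.1 ≤ b.1) := works_pairwise _
  have hs : (works.map Prod.fst).Pairwise (· ≤ ·) := List.pairwise_map.2 hW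
  set ws := PySem.List.sorted worker (fun x => x) with hws
  have hwsp : ws.Pairwise (· ≤ ·) := by
    have := PySem.List.sorted_pairwise worker (fun x => x)
    simpa using this
  -- A side
  rw [outer_fold works hW ws hwsp 0 0 0 (fun _ _ => Nat.zero_le _) (by simp [maxTake])]
  -- B side
  rw [bestFold_spec works]
  rw [PySem.List.foldl_add
    (g := fun w => PySem.List.pyGetD ((List.range (works.length + 1)).map (maxTake works))
      ((PySem.List.bisectRight (works.map Prod.fst) w : Nat) : Int) 0)]
  congr 2
  refine List.map_congr_left ?_
  intro w _
  refine (best_getD works _ ?_).symm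
  have := (PySem.List.bisectRight_spec (works.map Prod.fst) w hs).1
  simpa using this
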